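-- pv_equiv track=rewrite | github.com/MikeyThacker/Project-Euler | 59. XOR Decryption.py | split_by_thirds
-- ===== SOURCE A (Python) =====
-- def split_by_thirds(message):
--     count = -1
--     list1 = []
--     list2 = []
--     list3 = []
--
--     for letter in message:
--         count += 1
--         if count % 3 == 0:
--             list1.append(letter)
--         elif count % 3 == 1:
--             list2.append(letter)
--         elif count % 3 == 2:
--             list3.append(letter)
--     return list1, list2, list3
-- ===== SOURCE B (Python) =====
-- def split_by_thirds(message):
--     m = list(message)
--     n = len(m)
--     l1, l2, l3 = [], [], []
--     i = 0
--     while i < n: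
--         l1.append(m[i])
--         if i + 1 < n:
--             l2.append(m[i + 1])
--         if i + 2 < n:
--             l3.append(m[i + 2])
--         i += 3
--     return l1, l2, l3
-- ===== Notes on version B (the rewrite author's own statement) =====
-- stated objective: alternative
-- what changed: Replaces the counter-and-modulo dispatch over single elements by a stride-3 chunk loop that takes up to three elements per iteration by index, appending one to each list; no counter, no modulo.
import Mathlib
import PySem

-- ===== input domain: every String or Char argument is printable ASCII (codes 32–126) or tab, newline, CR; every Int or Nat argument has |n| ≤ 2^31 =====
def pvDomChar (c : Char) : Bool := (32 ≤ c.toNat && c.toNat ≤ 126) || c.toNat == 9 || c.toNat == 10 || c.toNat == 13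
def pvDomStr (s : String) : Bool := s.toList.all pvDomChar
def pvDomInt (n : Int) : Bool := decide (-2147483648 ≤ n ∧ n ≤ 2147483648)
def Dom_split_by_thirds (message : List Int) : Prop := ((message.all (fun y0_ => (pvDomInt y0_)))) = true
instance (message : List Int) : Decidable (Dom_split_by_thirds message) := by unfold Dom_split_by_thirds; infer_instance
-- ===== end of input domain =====

-- B replaces A's counter-and-mod-3 dispatch by a stride-3 chunk loop: each iteration takes the
-- next (up to) three elements by index and appends one to each list; no counter, no modulo.

-- ===== PORT A =====
-- single pass with a counter starting at -1; dispatch on count % 3, appending to one of three lists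
def split_by_thirds (message : List Int) : List Int × List Int × List Int :=
  let s := message.foldl
    (fun (st : Int × List Int × List Int × List Int) letter =>
      let count := st.1 + 1
      let l1 := st.2.1
      let l2 := st.2.2.1
      let l3 := st.2.2.2
      if PySem.Int.mod count 3 = 0 then (count, l1 ++ [letter], l2, l3)
      else if PySem.Int.mod count 3 = 1 then (count, l1, l2 ++ [letter], l3)
      else if PySem.Int.mod count 3 = 2 then (count, l1, l2, l3 ++ [letter])
      else (count, l1, l2, l3))
    (-1, [], [], [])
  (s.2.1, s.2.2.1, s.2.2.2)

-- ===== PORT B =====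
-- Source B's while loop: while i < n, append m[i] to l1, m[i+1] to l2 and m[i+2] to l3 when in
-- range, then i += 3; List.getD is exact here since every access is bounds-checked first
def splitLoop (m : List Int) (i : Nat) (l1 l2 l3 : List Int) : List Int × List Int × List Int :=
  if i < m.length then
    let l1' := l1 ++ [m.getD i 0]
    let l2' := if i + 1 < m.length then l2 ++ [m.getD (i + 1) 0] else l2
    let l3' := if i + 2 < m.length then l3 ++ [m.getD (i + 2) 0] else l3
    splitLoop m (i + 3) l1' l2' l3'
  else (l1, l2, l3)
termination_by m.length - i

def split_by_thirds_alt (message : List Int) : List Int × List Int × List Int :=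
  splitLoop message 0 [] [] []

-- ===== PRECONDITION & SPEC =====
def Spec_split_by_thirds (message : List Int) (out : List Int × List Int × List Int) : Prop := out = split_by_thirds_alt message
instance (message : List Int) (out : List Int × List Int × List Int) : Decidable (Spec_split_by_thirds message out) := by unfold Spec_split_by_thirds; infer_instance

-- ===== CLAIM (what is proved, stated in full; the proofs are below) =====
def Claim_equal_split_by_thirds : Prop := ∀ (message : List Int), Dom_split_by_thirds message → Spec_split_by_thirds message (split_by_thirds message)

-- ===== LEMMAS AND PROOFS =====

-- common reference form: structural recursion taking three elements at a time
def splitGo : List Int → List Int × List Int × List Int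
  | [] => ([], [], [])
  | [a] => ([a], [], [])
  | [a, b] => ([a], [b], [])
  | a :: b :: c :: rest =>
    let r := splitGo rest
    (a :: r.1, b :: r.2.1, c :: r.2.2)

-- A's loop body, named so the invariant lemma can speak about it
def pvStepA (st : Int × List Int × List Int × List Int) (letter : Int) : Int × List Int × List Int × List Int :=
  let count := st.1 + 1
  let l1 := st.2.1
  let l2 := st.2.2.1
  let l3 := st.2.2.2
  if PySem.Int.mod count 3 = 0 then (count, l1 ++ [letter], l2, l3)
  else if PySem.Int.mod count 3 = 1 then (count, l1, l2 ++ [letter], l3)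
  else if PySem.Int.mod count 3 = 2 then (count, l1, l2, l3 ++ [letter])
  else (count, l1, l2, l3)

-- A's invariant: whenever the incoming counter is ≡ -1 (mod 3), the fold appends exactly
-- the three lists splitGo computes
lemma pvInvA (msg : List Int) : ∀ (c : Int) (l1 l2 l3 : List Int), (c + 1) % 3 = 0 →
    msg.foldl pvStepA (c, l1, l2, l3) =
      (c + msg.length, l1 ++ (splitGo msg).1, l2 ++ (splitGo msg).2.1, l3 ++ (splitGo msg).2.2) := by
  induction msg using splitGo.induct with
  | case1 => intro c l1 l2 l3 h; simp [splitGo]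
  | case2 a => intro c l1 l2 l3 h; simp [splitGo, pvStepA, h]
  | case3 a b =>
      intro c l1 l2 l3 h
      have h2 : (c + 1 + 1) % 3 = 1 := by omega
      simp [splitGo, pvStepA, h, h2]
      omega
  | case4 a b d rest ih =>
      intro c l1 l2 l3 h
      have h2 : (c + 1 + 1) % 3 = 1 := by omega
      have h3 : (c + 1 + 1 + 1) % 3 = 2 := by omega
      simp only [List.foldl_cons]
      simp [pvStepA, h, h2, h3]
      rw [ih _ _ _ _ (by omega)]
      simp [splitGo]
      omega

-- B's invariant: the loop from index i appends exactly what splitGo yields on the tail m.drop i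
lemma pvInvB (m : List Int) : ∀ (i : Nat) (l1 l2 l3 : List Int),
    splitLoop m i l1 l2 l3 =
      (l1 ++ (splitGo (m.drop i)).1, l2 ++ (splitGo (m.drop i)).2.1, l3 ++ (splitGo (m.drop i)).2.2) := by
  intro i
  induction hn : m.length - i using Nat.strong_induction_on generalizing i with
  | _ n ih =>
    intro l1 l2 l3
    rw [splitLoop]
    by_cases h : i < m.length
    · have hd : m.drop i = m[i] :: m.drop (i + 1) := List.drop_eq_getElem_cons h
      by_cases h1 : i + 1 < m.length
      · have hd1 : m.drop (i+1) = m[i+1] :: m.drop (i + 2) := List.drop_eq_getElem_cons h1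
        by_cases h2 : i + 2 < m.length
        · have hd2 : m.drop (i+2) = m[i+2] :: m.drop (i + 3) := List.drop_eq_getElem_cons h2
          rw [if_pos h]
          simp only [if_pos h1, if_pos h2]
          rw [ih (m.length - (i + 3)) (by omega) (i + 3) rfl,
            List.getD_eq_getElem m 0 h, List.getD_eq_getElem m 0 h1, List.getD_eq_getElem m 0 h2,
            hd, hd1, hd2, splitGo]
          simp
        · -- exactly two elements remain
          have hd2 : m.drop (i+2) = [] := List.drop_eq_nil_of_le (by omega)
          rw [if_pos h]
          simp only [if_pos h1, if_neg h2]
          rw [ih (m.length - (i + 3)) (by omega) (i + 3) rfl,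
            List.getD_eq_getElem m 0 h, List.getD_eq_getElem m 0 h1, hd, hd1, hd2]
          have hd3 : m.drop (i+3) = [] := List.drop_eq_nil_of_le (by omega)
          rw [hd3, splitGo]
          simp [splitGo]
      · -- exactly one element remains
        have hd1 : m.drop (i+1) = [] := List.drop_eq_nil_of_le (by omega)
        rw [if_pos h]
        simp only [if_neg h1, if_neg (show ¬ i + 2 < m.length by omega)]
        rw [ih (m.length - (i + 3)) (by omega) (i + 3) rfl,
            List.getD_eq_getElem m 0 h, hd, hd1]
        have hd3 : m.drop (i+3) = [] := List.drop_eq_nil_of_le (by omega)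
        rw [hd3, splitGo]
        simp [splitGo]
    · rw [if_neg h]
      have : m.drop i = [] := List.drop_eq_nil_of_le (by omega)
      simp [this, splitGo]

-- ===== VERDICT (by name: the statement is the Claim_ definition above) =====
theorem split_by_thirds_spec : Claim_equal_split_by_thirds := by
  intro message _
  unfold Spec_split_by_thirds split_by_thirds_alt split_by_thirds
  rw [show (fun (st : Int × List Int × List Int × List Int) letter =>
      let count := st.1 + 1
      let l1 := st.2.1
      let l2 := st.2.2.1
      let l3 := st.2.2.2
      if PySem.Int.mod count 3 = 0 then (count, l1 ++ [letter], l2, l3)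
      else if PySem.Int.mod count 3 = 1 then (count, l1, l2 ++ [letter], l3)
      else if PySem.Int.mod count 3 = 2 then (count, l1, l2, l3 ++ [letter])
      else (count, l1, l2, l3)) = pvStepA from rfl]
  rw [pvInvA message (-1) [] [] [] (by decide), pvInvB message 0 [] [] []]
  simp
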